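-- pv_equiv track=rewrite | github.com/SyneRBI/PETRIC-MaGeZ | simulation_src/sim_utils.py | herman_meyer_order
-- ===== SOURCE A (Python) =====
-- import math
--
-- def herman_meyer_order(n):
--     order = [0] * n
--     factors = []
--     len_order = len(order)
--
--     while n % 2 == 0:
--         factors.append(2)
--         n //= 2
--
--     # Check for odd factors
--     for factor in range(3, int(n**0.5) + 1, 2):
--         while n % factor == 0:
--             factors.append(factor)
--             n //= factor
--
--     # If n is a prime number greater than 2
--     if n > 2:
--         factors.append(n)
--
--     n_factors = len(factors)
--     value = 0
--     for factor_n in range(n_factors):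
--         n_change_value = 1 if factor_n == 0 else math.prod(factors[:factor_n])
--         n_rep_value = 0
--
--         for element in range(len_order):
--             mapping = value
--             n_rep_value += 1
--             if n_rep_value >= n_change_value:
--                 value += 1
--                 n_rep_value = 0
--             if value == factors[factor_n]:
--                 value = 0
--             order[element] += math.prod(factors[factor_n + 1 :]) * mapping
--     return order
-- ===== SOURCE B (Python) =====
-- import math
--
-- def herman_meyer_order(n):
--     order = [0] * n
--     factors = []
--     len_order = len(order)
--
--     while n % 2 == 0:
--         factors.append(2)
--         n //= 2
--
--     # Check for odd factors
--     for factor in range(3, int(n**0.5) + 1, 2):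
--         while n % factor == 0:
--             factors.append(factor)
--             n //= factor
--
--     # If n is a prime number greater than 2
--     if n > 2:
--         factors.append(n)
--
--     n_factors = len(factors)
--     # Closed-form: entry i is the sum over factor positions f of the mixed-radix
--     # digit (i // prod(factors[:f])) % factors[f], weighted by prod(factors[f+1:]).
--     return [
--         sum(
--             math.prod(factors[f + 1 :]) * ((i // math.prod(factors[:f])) % factors[f])
--             for f in range(n_factors)
--         )
--         for i in range(len_order)
--     ]
-- ===== Notes on version B (the rewrite author's own statement) =====
-- stated objective: alternative
-- what changed: The factor-outer/element-inner double loop with maintained value/n_rep_value counters is replaced by a direct closed-form per-element computation: entry i is the sum over factor positions f of the mixed-radix digit (i // prod(factors[:f])) % factors[f] weighted by prod(factors[f+1:]); the factorization section is kept verbatim.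
import Mathlib
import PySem

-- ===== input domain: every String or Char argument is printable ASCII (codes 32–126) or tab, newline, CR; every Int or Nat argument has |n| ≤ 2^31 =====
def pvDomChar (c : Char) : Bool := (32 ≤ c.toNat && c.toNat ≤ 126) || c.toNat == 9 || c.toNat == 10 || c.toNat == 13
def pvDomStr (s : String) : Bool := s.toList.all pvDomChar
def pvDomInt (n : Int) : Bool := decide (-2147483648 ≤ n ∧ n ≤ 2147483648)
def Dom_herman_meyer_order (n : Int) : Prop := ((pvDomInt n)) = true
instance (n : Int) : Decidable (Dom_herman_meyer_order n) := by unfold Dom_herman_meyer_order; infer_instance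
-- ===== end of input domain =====

-- B replaces A's factor-outer/element-inner double loop with maintained value/n_rep_value
-- counters by a direct per-element closed form (mixed-radix digit extraction); the prime
-- factorization part is identical in both sources. Objective: alternative decomposition.

-- ===== PORT A =====

-- Shared factorization helper (this Python block is verbatim identical in Source A and Source B):
-- `while n % f == 0: factors.append(f); n //= f`.  The extra guards `n ≠ 0` and `2 ≤ f`
-- only make the recursion total: Python diverges when n = 0 (excluded by Pre_), and every
-- call site passes f ≥ 2, so on admitted inputs the guard equals Python's `n % f == 0`.
def pvDivOut (f : Nat) (n : Nat) (acc : List Nat) : List Nat × Nat :=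
  if h : n % f = 0 ∧ n ≠ 0 ∧ 2 ≤ f then
    pvDivOut f (n / f) (acc ++ [f])
  else (acc, n)
termination_by n
decreasing_by exact Nat.div_lt_self (Nat.pos_of_ne_zero h.2.1) h.2.2

-- `int(n**0.5)` equals Nat.sqrt for 0 ≤ n ≤ 2^31 (the double sqrt is exact to well below
-- one ulp at that magnitude); `range(3, bound, 2)` has (bound - 2) / 2 elements and step 2.
def pvFactorize (n : Int) : List Nat :=
  let p1 := pvDivOut 2 n.toNat []
  let bound := Nat.sqrt p1.2 + 1
  let odds := List.range' 3 ((bound - 2) / 2) 2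
  let p2 := odds.foldl (fun st f => pvDivOut f st.2 st.1) p1
  if 2 < p2.2 then p2.1 ++ [p2.2] else p2.1

-- body of A's inner `for element in range(len_order)` loop; state = (order, value, n_rep_value)
def pvInner (c m : Nat) (sfx : Int) (s : List Int × Nat × Nat) (element : Nat) :
    List Int × Nat × Nat :=
  let mapping := s.2.1
  let n_rep_value := s.2.2 + 1
  let vr : Nat × Nat := if c ≤ n_rep_value then (s.2.1 + 1, 0) else (s.2.1, n_rep_value)
  let value := if vr.1 = m then 0 else vr.1
  (s.1.modify element (fun a => a + sfx * (mapping : Int)), value, vr.2)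

-- body of A's outer `for factor_n in range(n_factors)` loop; state = (order, value)
def pvOuter (factors : List Nat) (len_order : Nat) (st : List Int × Nat) (factor_n : Nat) :
    List Int × Nat :=
  let n_change_value := if factor_n = 0 then 1 else (factors.take factor_n).prod
  let st2 := (List.range len_order).foldl
    (pvInner n_change_value (factors.getD factor_n 0) ((factors.drop (factor_n + 1)).prod : Int))
    (st.1, st.2, 0)
  (st2.1, st2.2.1)

def herman_meyer_order (n : Int) : List Int :=
  let len_order := n.toNat
  let factors := pvFactorize n
  let n_factors := factors.length
  ((List.range n_factors).foldl (pvOuter factors len_order)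
    (List.replicate len_order 0, 0)).1

-- ===== PORT B =====

def herman_meyer_order_alt (n : Int) : List Int :=
  let len_order := n.toNat
  let factors := pvFactorize n
  let n_factors := factors.length
  (List.range len_order).map (fun i =>
    ((List.range n_factors).map (fun f =>
      ((factors.drop (f + 1)).prod : Int) *
        (((i / (factors.take f).prod) % factors.getD f 0 : Nat) : Int))).sum)

-- ===== PRECONDITION & SPEC =====
-- Pre_ excludes exactly the inputs on which the Python A does not return: n = 0 (the
-- `while n % 2 == 0` loop diverges) and n < 0 (`int(n**0.5)` raises TypeError on a complex).
def Pre_herman_meyer_order (n : Int) : Prop := 1 ≤ n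
instance (n : Int) : Decidable (Pre_herman_meyer_order n) := by
  unfold Pre_herman_meyer_order; infer_instance
def pvWitness_herman_meyer_order : Int := (6)

def Spec_herman_meyer_order (n : Int) (out : List Int) : Prop := out = herman_meyer_order_alt n
instance (n : Int) (out : List Int) : Decidable (Spec_herman_meyer_order n out) := by
  unfold Spec_herman_meyer_order; infer_instance

-- ===== CLAIM (what is proved, stated in full; the proofs are below) =====
def Claim_equal_herman_meyer_order : Prop := ∀ (n : Int), Dom_herman_meyer_order n → Pre_herman_meyer_order n → Spec_herman_meyer_order n (herman_meyer_order n)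

-- ===== LEMMAS AND PROOFS =====

lemma pv_mod_succ (a m : Nat) (hm : 0 < m) :
    (a + 1) % m = if a % m + 1 = m then 0 else a % m + 1 := by
  have h1 : (a + 1) % m = (a % m + 1) % m := by
    conv_lhs => rw [← Nat.mod_add_mod]
  split
  · next h => rw [h1, h, Nat.mod_self]
  · next h =>
    have := Nat.mod_lt a hm
    rw [h1, Nat.mod_eq_of_lt (by omega)]

lemma pv_div_succ (a c : Nat) :
    (a + 1) / c = if (a + 1) % c = 0 then a / c + 1 else a / c := by
  rw [Nat.succ_div]
  by_cases h : c ∣ a + 1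
  · rw [if_pos h, if_pos (Nat.dvd_iff_mod_eq_zero.1 h)]
  · rw [if_neg h, if_neg (fun hm => h (Nat.dvd_iff_mod_eq_zero.2 hm))]
    omega

lemma pvDivOut_spec (f : Nat) (n : Nat) (acc : List Nat) (hn : 0 < n) :
    (pvDivOut f n acc).1.prod * (pvDivOut f n acc).2 = acc.prod * n
    ∧ 0 < (pvDivOut f n acc).2
    ∧ (pvDivOut f n acc).2 ∣ n
    ∧ ∀ x ∈ (pvDivOut f n acc).1, x ∈ acc ∨ x = f := by
  revert hn
  induction n, acc using pvDivOut.induct f with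
  | case1 n acc h ih =>
    intro hn
    rw [pvDivOut, dif_pos h]
    have hdvd : f ∣ n := Nat.dvd_of_mod_eq_zero h.1
    have hpos : 0 < n / f := Nat.div_pos (Nat.le_of_dvd hn hdvd) (by omega)
    obtain ⟨p, q, d, m⟩ := ih hpos
    refine ⟨?_, q, d.trans (Nat.div_dvd_of_dvd hdvd), ?_⟩
    · rw [p, List.prod_append, List.prod_cons, List.prod_nil]
      rw [mul_one, mul_assoc, Nat.mul_div_cancel' hdvd]
    · intro x hx
      rcases m x hx with hx' | hx'
      · rcases List.mem_append.1 hx' with h1 | h1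
        · exact Or.inl h1
        · simp at h1; exact Or.inr h1
      · exact Or.inr hx'
  | case2 n acc h =>
    intro hn
    rw [pvDivOut, dif_neg h]
    exact ⟨by ring, hn, dvd_rfl, fun x hx => Or.inl hx⟩

lemma pvDivOut_stop (f : Nat) (n : Nat) (acc : List Nat) (hf : 2 ≤ f) :
    (pvDivOut f n acc).2 % f ≠ 0 ∨ (pvDivOut f n acc).2 = 0 := by
  induction n, acc using pvDivOut.induct f with
  | case1 n acc h ih => rw [pvDivOut, dif_pos h]; exact ih
  | case2 n acc h =>
    rw [pvDivOut, dif_neg h]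
    push Not at h
    by_cases h0 : n = 0
    · exact Or.inr h0
    · exact Or.inl (fun hm => h0 (by have := h hm h0; omega))

lemma pvFold_inv (N : Nat) (l : List Nat) (hl : ∀ f ∈ l, 2 ≤ f) (st : List Nat × Nat)
    (ha : st.1.prod * st.2 = N) (hb : 0 < st.2) (hc : ¬ 2 ∣ st.2)
    (hd : ∀ x ∈ st.1, 2 ≤ x) :
    (l.foldl (fun st f => pvDivOut f st.2 st.1) st).1.prod *
        (l.foldl (fun st f => pvDivOut f st.2 st.1) st).2 = N
    ∧ 0 < (l.foldl (fun st f => pvDivOut f st.2 st.1) st).2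
    ∧ ¬ 2 ∣ (l.foldl (fun st f => pvDivOut f st.2 st.1) st).2
    ∧ ∀ x ∈ (l.foldl (fun st f => pvDivOut f st.2 st.1) st).1, 2 ≤ x := by
  induction l generalizing st with
  | nil => exact ⟨ha, hb, hc, hd⟩
  | cons f t ih =>
    simp only [List.foldl_cons]
    obtain ⟨p', q', d', m'⟩ := pvDivOut_spec f st.2 st.1 hb
    refine ih (fun g hg => hl g (List.mem_cons_of_mem _ hg)) _ (by rw [p', ha]) q'
      (fun h => hc (h.trans d')) ?_
    intro x hx
    rcases m' x hx with h | h
    · exact hd x h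
    · exact h ▸ hl f List.mem_cons_self

lemma pvFactorize_spec (n : Int) (hn : 1 ≤ n) :
    (pvFactorize n).prod = n.toNat ∧ ∀ x ∈ pvFactorize n, 2 ≤ x := by
  have hn0 : 0 < n.toNat := by omega
  obtain ⟨p, q, d, m⟩ := pvDivOut_spec 2 n.toNat [] hn0
  have hodd : ¬ 2 ∣ (pvDivOut 2 n.toNat []).2 := by
    rcases pvDivOut_stop 2 n.toNat [] le_rfl with h | h
    · intro hd2
      obtain ⟨k, hk⟩ := hd2
      rw [hk] at h
      omega
    · omega
  have hmem : ∀ x ∈ (pvDivOut 2 n.toNat []).1, 2 ≤ x := by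
    intro x hx
    rcases m x hx with h | h
    · simp at h
    · omega
  have hl : ∀ f ∈ List.range' 3 ((Nat.sqrt (pvDivOut 2 n.toNat []).2 + 1 - 2) / 2) 2,
      2 ≤ f := by
    intro f hf
    obtain ⟨i, _, rfl⟩ := List.mem_range'.1 hf
    omega
  obtain ⟨A, B, C, D⟩ := pvFold_inv n.toNat _ hl (pvDivOut 2 n.toNat [])
    (by simpa using p) q hodd hmem
  unfold pvFactorize
  dsimp only
  by_cases h : 2 < (List.foldl (fun st f => pvDivOut f st.2 st.1) (pvDivOut 2 n.toNat [])
      (List.range' 3 ((Nat.sqrt (pvDivOut 2 n.toNat []).2 + 1 - 2) / 2) 2)).2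
  · rw [if_pos h]
    constructor
    · rw [List.prod_append, List.prod_cons, List.prod_nil, mul_one]
      exact A
    · intro x hx
      rcases List.mem_append.1 hx with h1 | h1
      · exact D x h1
      · have h' : 2 < (List.foldl (fun st f => pvDivOut f st.2 st.1) (pvDivOut 2 n.toNat [])
      (List.range' 3 ((Nat.sqrt (pvDivOut 2 n.toNat []).2 + 1 - 2) / 2) 2)).2 := h
        simp at h1
        have h1' : x = (List.foldl (fun st f => pvDivOut f st.2 st.1) (pvDivOut 2 n.toNat [])
      (List.range' 3 ((Nat.sqrt (pvDivOut 2 n.toNat []).2 + 1 - 2) / 2) 2)).2 := h1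
        clear h h1
        omega
  · rw [if_neg h]
    have h' : ¬ 2 < (List.foldl (fun st f => pvDivOut f st.2 st.1) (pvDivOut 2 n.toNat [])
      (List.range' 3 ((Nat.sqrt (pvDivOut 2 n.toNat []).2 + 1 - 2) / 2) 2)).2 := h
    have h1 : (List.foldl (fun st f => pvDivOut f st.2 st.1) (pvDivOut 2 n.toNat [])
      (List.range' 3 ((Nat.sqrt (pvDivOut 2 n.toNat []).2 + 1 - 2) / 2) 2)).2 = 1 := by
      clear h; omega
    rw [h1, mul_one] at A
    exact ⟨A, D⟩

lemma inner_char (c m : Nat) (hc : 0 < c) (hm : 0 < m) (sfx : Int) (g : Nat → Int)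
    (Lo : Nat) (L : Nat) :
    (List.range L).foldl (pvInner c m sfx) ((List.range Lo).map g, 0, 0)
      = ((List.range Lo).map (fun j =>
            if j < L then g j + sfx * (((j / c) % m : Nat) : Int) else g j),
         (L / c) % m, L % c) := by
  induction L with
  | zero =>
    simp only [List.range_zero, List.foldl_nil, Nat.zero_div, Nat.zero_mod]
    refine congrArg (fun l => (l, (0 : Nat), (0 : Nat))) ?_
    refine List.map_congr_left ?_
    intro j hj
    simp
  | succ L ih =>
    rw [List.range_succ, List.foldl_append, ih, List.foldl_cons, List.foldl_nil]
    unfold pvInner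
    dsimp only
    have hmod : (L + 1) % c = if L % c + 1 = c then 0 else L % c + 1 := pv_mod_succ L c hc
    have hdiv : (L + 1) / c = if (L + 1) % c = 0 then L / c + 1 else L / c := pv_div_succ L c
    have hmlt : L % c < c := Nat.mod_lt L hc
    have hvlt : (L / c) % m < m := Nat.mod_lt (L / c) hm
    refine congrArg₂ (fun (l : List Int) (p : Nat × Nat) => (l, p)) ?_ ?_
    · refine List.ext_getElem (by simp) ?_
      intro j hj1 hj2
      have hjLo : j < Lo := by simpa using hj2
      rw [List.getElem_modify]
      simp only [List.getElem_map, List.getElem_range]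
      by_cases hLj : L = j
      · subst hLj
        rw [if_pos rfl, if_neg (lt_irrefl L), if_pos (Nat.lt_succ_self L)]
      · rw [if_neg hLj]
        by_cases hjL : j < L
        · rw [if_pos hjL, if_pos (Nat.lt_succ_of_lt hjL)]
        · rw [if_neg hjL, if_neg (by omega)]
    · by_cases hinc : c ≤ L % c + 1
      · have he : L % c + 1 = c := by omega
        have hz : (L + 1) % c = 0 := by rw [hmod, if_pos he]
        rw [if_pos hinc]
        have hd : (L + 1) / c = L / c + 1 := by rw [hdiv, if_pos hz]
        refine congrArg₂ Prod.mk ?_ hz.symm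
        rw [hd, pv_mod_succ (L / c) m hm]
      · have he : ¬ L % c + 1 = c := by omega
        have hz : (L + 1) % c = L % c + 1 := by rw [hmod, if_neg he]
        rw [if_neg hinc]
        have hd : (L + 1) / c = L / c := by rw [hdiv, hz]; simp
        refine congrArg₂ Prod.mk ?_ hz.symm
        rw [hd, if_neg (by omega)]

lemma outer_char (F : List Nat) (h2 : ∀ x ∈ F, 2 ≤ x) (L : Nat) (hL : F.prod = L)
    (k : Nat) (hk : k ≤ F.length) :
    (List.range k).foldl (pvOuter F L) ((List.range L).map (fun _ => (0 : Int)), 0)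
      = ((List.range L).map (fun i => ((List.range k).map (fun f =>
            ((F.drop (f + 1)).prod : Int) *
              (((i / (F.take f).prod) % F.getD f 0 : Nat) : Int))).sum), 0) := by
  induction k with
  | zero => simp
  | succ k ih =>
    have hklt : k < F.length := hk
    rw [List.range_succ, List.foldl_append, ih (Nat.le_of_lt hklt), List.foldl_cons,
      List.foldl_nil]
    unfold pvOuter
    dsimp only
    have hcv : (if k = 0 then 1 else (F.take k).prod) = (F.take k).prod := by
      cases k
      · simp
      · rfl
    have hc : 0 < (F.take k).prod :=
      List.prod_pos (fun x hx => lt_of_lt_of_le two_pos (h2 x (List.mem_of_mem_take hx)))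
    have hgd : F.getD k 0 = F[k] := List.getD_eq_getElem F 0 hklt
    have hm : 0 < F.getD k 0 := by
      rw [hgd]
      exact lt_of_lt_of_le two_pos (h2 _ (List.getElem_mem hklt))
    rw [hcv, inner_char (F.take k).prod (F.getD k 0) hc hm _ _ L L]
    have hdvd : L = (F.take k).prod * (F[k] * (F.drop (k + 1)).prod) := by
      rw [← hL, ← List.prod_take_mul_prod_drop F k, List.drop_eq_getElem_cons hklt,
        List.prod_cons]
    refine congrArg₂ Prod.mk ?_ ?_
    · refine List.ext_getElem (by simp) ?_
      intro j hj1 hj2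
      have hjL : j < L := by simpa using hj1
      simp only [List.getElem_map, List.getElem_range]
      rw [if_pos hjL, List.map_append, List.sum_append]
      simp
    · dsimp only
      rw [hdvd, Nat.mul_div_cancel_left _ hc, hgd, Nat.mul_mod_right]

-- ===== VERDICT (by name: the statement is the Claim_ definition above) =====
theorem herman_meyer_order_spec : Claim_equal_herman_meyer_order := by
  intro n _ hpre
  unfold Spec_herman_meyer_order herman_meyer_order herman_meyer_order_alt
  dsimp only
  obtain ⟨hprod, h2⟩ := pvFactorize_spec n hpre
  have hrep : (List.replicate n.toNat (0 : Int)) = (List.range n.toNat).map (fun _ => (0 : Int)) := by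
    rw [List.map_const', List.length_range]
  rw [hrep, outer_char (pvFactorize n) h2 n.toNat hprod (pvFactorize n).length le_rfl]
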